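-- pv_equiv track=rewrite | github.com/mattischneider/aoc2020 | 12.py | get_new_waypoint_position
-- ===== SOURCE A (Python) =====
-- def get_new_waypoint_position(waypoint_position, turning_degree, turning_direction):
--     new_x, new_y = waypoint_position[0], waypoint_position[1]
--     for i in range(0, int(turning_degree/90)):
--         if turning_direction == 'R':
--             new_x, new_y = new_y, -new_x
--         if turning_direction == 'L':
--             new_x, new_y = -new_y, new_x
--     return([new_x, new_y])
-- ===== SOURCE B (Python) =====
-- def get_new_waypoint_position(waypoint_position, turning_degree, turning_direction):
--     x, y = waypoint_position[0], waypoint_position[1]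
--     count = int(turning_degree / 90)
--     if count <= 0 or turning_direction not in ('R', 'L'):
--         return [x, y]
--     r = count % 4 if turning_direction == 'R' else (-count) % 4
--     if r == 1:
--         return [y, -x]
--     if r == 2:
--         return [-x, -y]
--     if r == 3:
--         return [-y, x]
--     return [x, y]
-- ===== Notes on version B (the rewrite author's own statement) =====
-- stated objective: simpler
-- what changed: Replaces the per-90-degree rotation loop with a single direct transformation selected by the reduced rotation index count % 4 (mirrored via (-count) % 4 for 'L'), clamping non-positive counts and unknown directions to the identity.
import Mathlib
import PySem

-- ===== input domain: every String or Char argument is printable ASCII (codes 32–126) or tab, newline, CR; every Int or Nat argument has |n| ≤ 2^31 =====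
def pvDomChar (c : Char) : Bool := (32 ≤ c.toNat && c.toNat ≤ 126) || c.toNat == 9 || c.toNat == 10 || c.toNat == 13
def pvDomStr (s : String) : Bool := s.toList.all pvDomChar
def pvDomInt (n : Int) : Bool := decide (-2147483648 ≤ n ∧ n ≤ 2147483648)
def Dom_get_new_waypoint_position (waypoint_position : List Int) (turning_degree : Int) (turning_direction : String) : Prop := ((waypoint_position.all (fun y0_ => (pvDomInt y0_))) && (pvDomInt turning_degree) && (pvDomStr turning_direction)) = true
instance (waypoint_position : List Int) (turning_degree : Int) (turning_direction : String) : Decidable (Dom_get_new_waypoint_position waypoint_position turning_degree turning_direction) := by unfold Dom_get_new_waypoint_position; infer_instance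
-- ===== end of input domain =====

-- ===== PORT A =====
-- B rotates by one direct table lookup on count % 4 instead of A's per-90-degree loop (objective: simpler).
-- Python's int(turning_degree/90) (float division then truncation) equals truncation toward zero (Int.tdiv)
-- for |turning_degree| ≤ 2^31, which Dom guarantees; ported as Int.tdiv.
-- the body of A's 'for i in range(0, count)' loop, run once per remaining iteration
-- (the loop variable i is unused by the body, so the loop is its iteration count)
def pvLoopA (turning_direction : String) : Nat → Int × Int → Int × Int
  | 0, p => p
  | Nat.succ k, p =>
      let p := if turning_direction == "R" then (p.2, -p.1) else p
      let p := if turning_direction == "L" then (-p.2, p.1) else p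
      pvLoopA turning_direction k p

def get_new_waypoint_position (waypoint_position : List Int) (turning_degree : Int) (turning_direction : String) : List Int :=
  match PySem.List.pyGet? waypoint_position 0, PySem.List.pyGet? waypoint_position 1 with
  | some x0, some y0 =>
    -- range(0, count) performs count iterations (none when count ≤ 0), i.e. (Int.tdiv … 90).toNat
    let st := pvLoopA turning_direction (Int.tdiv turning_degree 90).toNat (x0, y0)
    [st.1, st.2]
  | _, _ => []  -- unreachable under Pre_ (Python raises IndexError)

-- ===== PORT B =====
def get_new_waypoint_position_alt (waypoint_position : List Int) (turning_degree : Int) (turning_direction : String) : List Int :=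
  -- the [] fallbacks are unreachable under Pre_ (Python raises IndexError there)
  (PySem.List.pyGet? waypoint_position 0).elim [] (fun x =>
    (PySem.List.pyGet? waypoint_position 1).elim [] (fun y =>
      let count := Int.tdiv turning_degree 90
      if count ≤ 0 ∨ (turning_direction ≠ "R" ∧ turning_direction ≠ "L") then [x, y]
      else
        let r := if turning_direction == "R" then PySem.Int.mod count 4 else PySem.Int.mod (-count) 4
        if r = 1 then [y, -x]
        else if r = 2 then [-x, -y]
        else if r = 3 then [-y, x]
        else [x, y]))

-- ===== PRECONDITION & SPEC =====
-- Pre_ excludes only lists of fewer than 2 elements, on which Python A raises IndexError.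
def Pre_get_new_waypoint_position (waypoint_position : List Int) (turning_degree : Int) (turning_direction : String) : Prop := 2 ≤ waypoint_position.length
instance (waypoint_position : List Int) (turning_degree : Int) (turning_direction : String) : Decidable (Pre_get_new_waypoint_position waypoint_position turning_degree turning_direction) := by unfold Pre_get_new_waypoint_position; infer_instance
def pvWitness_get_new_waypoint_position : List Int × Int × String := ([10, 4], 270, "R")
def Spec_get_new_waypoint_position (waypoint_position : List Int) (turning_degree : Int) (turning_direction : String) (out : List Int) : Prop := out = get_new_waypoint_position_alt waypoint_position turning_degree turning_direction
instance (waypoint_position : List Int) (turning_degree : Int) (turning_direction : String) (out : List Int) : Decidable (Spec_get_new_waypoint_position waypoint_position turning_degree turning_direction out) := by unfold Spec_get_new_waypoint_position; infer_instance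

-- ===== CLAIM (what is proved, stated in full; the proofs are below) =====
def Claim_equal_get_new_waypoint_position : Prop := ∀ (waypoint_position : List Int) (turning_degree : Int) (turning_direction : String), Dom_get_new_waypoint_position waypoint_position turning_degree turning_direction → Pre_get_new_waypoint_position waypoint_position turning_degree turning_direction → Spec_get_new_waypoint_position waypoint_position turning_degree turning_direction (get_new_waypoint_position waypoint_position turning_degree turning_direction)

-- ===== LEMMAS AND PROOFS =====
-- the loop recursion is an iterate of its body
theorem pv_loopA_eq_iterate (dir : String) : ∀ (k : Nat) (p : Int × Int),
    pvLoopA dir k p = (fun p : Int × Int =>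
      let p := if dir == "R" then (p.2, -p.1) else p
      let p := if dir == "L" then (-p.2, p.1) else p
      p)^[k] p := by
  intro k
  induction k with
  | zero => intro p; simp [pvLoopA]
  | succ k ih => intro p; rw [pvLoopA, ih, Function.iterate_succ_apply]

-- period-4 maps iterate by the index mod 4
theorem pv_iter4 {a : Type} (f : a → a) (h : ∀ p, f (f (f (f p))) = p) : ∀ (k : Nat) (p : a), f^[k] p = f^[k % 4] p := by
  intro k
  induction k using Nat.strong_induction_on with
  | _ k ih =>
    intro p
    by_cases hk : k < 4
    · rw [Nat.mod_eq_of_lt hk]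
    · have h4 : k = (k - 4) + 4 := by omega
      have hfix : f^[4] p = p := by
        show f^[4] p = p
        simp [Function.iterate_succ_apply, h p]
      rw [h4, Function.iterate_add_apply, hfix, ih (k - 4) (by omega)]
      congr 1
      omega

-- ===== VERDICT =====
theorem get_new_waypoint_position_spec : Claim_equal_get_new_waypoint_position := by
  unfold Claim_equal_get_new_waypoint_position
  intro wp deg dir _hdom hpre
  unfold Pre_get_new_waypoint_position at hpre
  unfold Spec_get_new_waypoint_position
  match wp, hpre with
  | x :: y :: rest, _ =>
    have h0 : PySem.List.pyGet? (x :: y :: rest) 0 = some x := PySem.List.pyGet?_zero_cons x (y :: rest)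
    have h1 : PySem.List.pyGet? (x :: y :: rest) 1 = some y := by
      rw [show (1 : Int) = ((0 : Nat) : Int) + 1 by norm_num, PySem.List.pyGet?_cons_succ]
      simp
    unfold get_new_waypoint_position get_new_waypoint_position_alt
    simp only [h0, h1, Option.elim_some]
    set n : Int := Int.tdiv deg 90 with hn
    rw [pv_loopA_eq_iterate]
    by_cases hR : dir = "R"
    · subst hR
      simp only [beq_iff_eq, reduceIte, show ("R" : String) ≠ "L" by decide]
      by_cases hle : n ≤ 0
      · have : n.toNat = 0 := by omega
        simp [hle, this]
      · rw [if_neg (by simp [hle])]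
        have hpos : 0 < n := by omega
        set k : Nat := n.toNat with hk
        rw [pv_iter4 _ (by intro p; simp)]
        have hm : PySem.Int.mod n 4 = ((k % 4 : Nat) : Int) := by
          rw [PySem.Int.mod_eq_emod_of_pos (by norm_num)]
          omega
        rw [hm]
        have h4 : k % 4 < 4 := Nat.mod_lt _ (by omega)
        interval_cases h : k % 4 <;> simp [Function.iterate_succ_apply]
    · by_cases hL : dir = "L"
      · subst hL
        simp only [beq_iff_eq, reduceIte, show ("L" : String) ≠ "R" by decide]
        by_cases hle : n ≤ 0
        · have : n.toNat = 0 := by omega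
          simp [hle, this]
        · rw [if_neg (by simp [hle])]
          have hpos : 0 < n := by omega
          set k : Nat := n.toNat with hk
          rw [pv_iter4 _ (by intro p; simp)]
          have h4 : k % 4 < 4 := Nat.mod_lt _ (by omega)
          have hm : PySem.Int.mod (-n) 4 = (((4 - k % 4) % 4 : Nat) : Int) := by
            rw [PySem.Int.mod_eq_emod_of_pos (by norm_num)]
            omega
          rw [hm]
          interval_cases h : k % 4 <;> simp [Function.iterate_succ_apply]
      · simp only [beq_iff_eq, if_neg hR, if_neg hL]
        simp [hR, hL, Function.iterate_fixed]
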